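-- pv_equiv track=rewrite | github.com/Ftedp/Algoritmos-de-Busqued-Prog3 | juegos/juego_de_plias.py | acciones
-- ===== SOURCE A (Python) =====
-- def acciones(estado):
--     acciones_posibles = []
--     for i, pila in enumerate(estado): # i es el indice de la pila
--         for j in range(1, pila): # intentamos partir en j y pila-j
--             k = pila - j
--             if j != k:
--                 a, b = max(j, k), min(j, k)
--                 acciones_posibles.append((i, a, b))
--     return acciones_posibles
-- ===== SOURCE B (Python) =====
-- def acciones(estado):
--     acciones_posibles = []
--     for i, pila in enumerate(estado):
--         half = [(i, pila - j, j) for j in range(1, (pila - 1) // 2 + 1)]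
--         acciones_posibles += half + list(reversed(half))
--     return acciones_posibles
-- ===== Notes on version B (the rewrite author's own statement) =====
-- stated objective: alternative
-- what changed: Instead of scanning all split points j in range(1, pila) and recomputing max/min per j, B builds only the larger-first half of the splits by a closed-form bound (pila-1)//2 and mirrors it, exploiting the symmetry j <-> pila-j.
import Mathlib
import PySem

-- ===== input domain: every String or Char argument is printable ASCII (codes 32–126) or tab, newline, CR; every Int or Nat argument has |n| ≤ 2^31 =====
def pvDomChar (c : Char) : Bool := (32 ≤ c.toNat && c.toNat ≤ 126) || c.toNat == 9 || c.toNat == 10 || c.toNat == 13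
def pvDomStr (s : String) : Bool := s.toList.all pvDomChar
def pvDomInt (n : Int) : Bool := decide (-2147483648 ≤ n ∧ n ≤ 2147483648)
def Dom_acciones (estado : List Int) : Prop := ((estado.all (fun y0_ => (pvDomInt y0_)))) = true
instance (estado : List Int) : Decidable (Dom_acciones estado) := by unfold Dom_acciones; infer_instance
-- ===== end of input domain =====

-- B builds, per pile, only the larger-first half of the splits via the closed-form bound
-- (pila-1)//2 and mirrors it, instead of A's scan over all split points with max/min per point.

-- ===== PORT A =====
def acciones (estado : List Int) : List (Int × Int × Int) :=
  (PySem.List.enumerate estado 0).foldl (fun acc ip =>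
    (PySem.List.pyRange 1 ip.2 1).foldl (fun acc2 j =>
      let k := ip.2 - j
      if j ≠ k then acc2 ++ [(ip.1, max j k, min j k)] else acc2) acc) []

-- ===== PORT B =====
-- half = [(i, pila - j, j) for j in range(1, (pila - 1) // 2 + 1)]
def accHalf (i n : Int) : List (Int × Int × Int) :=
  (PySem.List.pyRange 1 (PySem.Int.floordiv (n - 1) 2 + 1) 1).map (fun j => (i, n - j, j))

def acciones_alt (estado : List Int) : List (Int × Int × Int) :=
  (PySem.List.enumerate estado 0).foldl (fun acc ip =>
    acc ++ (accHalf ip.1 ip.2 ++ (accHalf ip.1 ip.2).reverse)) []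

-- ===== PRECONDITION & SPEC =====
def Spec_acciones (estado : List Int) (out : List (Int × Int × Int)) : Prop := out = acciones_alt estado
instance (estado : List Int) (out : List (Int × Int × Int)) : Decidable (Spec_acciones estado out) := by unfold Spec_acciones; infer_instance

-- ===== CLAIM (what is proved, stated in full; the proofs are below) =====
def Claim_equal_acciones : Prop := ∀ (estado : List Int), Dom_acciones estado → Spec_acciones estado (acciones estado)

-- ===== LEMMAS AND PROOFS =====

-- A's per-pile filtered scan over range(1, n) equals B's half ++ half.reverse.
theorem core (i n : Int) :
    ((PySem.List.pyRange 1 n 1).filter (fun j => decide (j ≠ n - j))).map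
      (fun j => (i, max j (n - j), min j (n - j)))
    = accHalf i n ++ (accHalf i n).reverse := by
  by_cases hn : n ≤ 1
  · have h2 : PySem.Int.floordiv (n-1) 2 = (n-1)/2 := PySem.Int.floordiv_eq_ediv_of_pos (by norm_num)
    rw [accHalf, h2, PySem.List.pyRange_one_eq_nil hn, PySem.List.pyRange_one_eq_nil (by omega)]
    simp
  · push Not at hn
    obtain ⟨H, hH⟩ : ∃ H : Nat, n = 2*(H:Int)+1 ∨ n = 2*(H:Int)+2 := ⟨((n-1)/2).toNat, by omega⟩
    have hfd : PySem.Int.floordiv (n-1) 2 = (H:Int) := by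
      rw [PySem.Int.floordiv_eq_ediv_of_pos (by norm_num)]; omega
    have htn : ((H:Int) + 1 - 1).toNat = H := by omega
    have hhalf : accHalf i n
        = (List.range H).map (fun (k : Nat) => (i, n - (1+(k:Int)), 1+(k:Int))) := by
      rw [accHalf, hfd, PySem.List.pyRange_one, List.map_map, htn]; rfl
    have hsplit : PySem.List.pyRange 1 n 1
        = PySem.List.pyRange 1 ((H:Int)+1) 1 ++ PySem.List.pyRange ((H:Int)+1) n 1 :=
      PySem.List.pyRange_one_append 1 ((H:Int)+1) n (by omega) (by omega)
    rw [hsplit, List.filter_append, List.map_append]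
    have hlow : ((PySem.List.pyRange 1 ((H:Int)+1) 1).filter (fun j => decide (j ≠ n - j))).map
        (fun j => (i, max j (n - j), min j (n - j))) = accHalf i n := by
      rw [List.filter_eq_self.mpr, hhalf, PySem.List.pyRange_one, List.map_map, htn]
      · refine List.map_congr_left (fun k hk => ?_)
        have hk' := List.mem_range.mp hk
        have hle : (1:Int) + k ≤ n - (1 + k) := by omega
        simp only [Function.comp, max_eq_right hle, min_eq_left hle]
      · intro j hj
        have := (PySem.List.mem_pyRange_one).mp hj
        simp only [decide_eq_true_eq]; omega
    have hrev : (accHalf i n).reverse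
        = (List.range H).map (fun (k : Nat) => (i, n - ((H:Int)-k), (H:Int)-(k:Int))) := by
      rw [hhalf, ← List.map_reverse, List.range_eq_range', List.reverse_range', List.map_map,
        ← List.range_eq_range']
      refine List.map_congr_left (fun k hk => ?_)
      have hk' := List.mem_range.mp hk
      simp only [Function.comp, Prod.mk.injEq]
      exact ⟨trivial, by omega, by omega⟩
    have hupGen : ∀ (m : Int), m = n - (H:Int) →
        ((PySem.List.pyRange m n 1).filter (fun j => decide (j ≠ n - j))).map
          (fun j => (i, max j (n - j), min j (n - j))) = (accHalf i n).reverse := by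
      intro m hm
      rw [List.filter_eq_self.mpr, hrev, PySem.List.pyRange_one, List.map_map]
      · have htm : (n - m).toNat = H := by omega
        rw [htm]
        refine List.map_congr_left (fun k hk => ?_)
        have hk' := List.mem_range.mp hk
        have hge : n - (m + k) ≤ m + (k:Int) := by omega
        simp only [Function.comp, max_eq_left hge, min_eq_right hge, Prod.mk.injEq]
        exact ⟨trivial, by omega, by omega⟩
      · intro j hj
        have := (PySem.List.mem_pyRange_one).mp hj
        simp only [decide_eq_true_eq]; omega
    rcases hH with h | h
    · rw [hlow, hupGen ((H:Int)+1) (by omega)]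
    · have h12 : (H:Int)+1+1 = (H:Int)+2 := by ring
      have hc : PySem.List.pyRange ((H:Int)+1) n 1
          = ((H:Int)+1) :: PySem.List.pyRange ((H:Int)+2) n 1 := by
        rw [PySem.List.pyRange_one_cons (by omega), h12]
      rw [hlow, hc, List.filter_cons]
      have hd : (decide (((H:Int)+1) ≠ n - ((H:Int)+1))) = false := by
        simp only [decide_eq_false_iff_not]; omega
      rw [hd]
      simp only [Bool.false_eq_true, if_false]
      rw [hupGen ((H:Int)+2) (by omega)]

-- Lift core to A's per-pile fold ('if j != k: append') via PySem.List.foldl_append_ite.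
theorem pile_eq (i n : Int) (acc : List (Int × Int × Int)) :
    (PySem.List.pyRange 1 n 1).foldl (fun acc2 j =>
      let k := n - j
      if j ≠ k then acc2 ++ [(i, max j k, min j k)] else acc2) acc
    = acc ++ (accHalf i n ++ (accHalf i n).reverse) := by
  rw [show (fun (acc2 : List (Int × Int × Int)) (j : Int) =>
        let k := n - j
        if j ≠ k then acc2 ++ [(i, max j k, min j k)] else acc2)
      = (fun acc2 j => if j ≠ n - j then acc2 ++ [(i, max j (n - j), min j (n - j))] else acc2)
      from rfl]
  rw [PySem.List.foldl_append_ite, core]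

theorem outer_eq (l : List (Int × Int)) (acc : List (Int × Int × Int)) :
    l.foldl (fun acc ip =>
      (PySem.List.pyRange 1 ip.2 1).foldl (fun acc2 j =>
        let k := ip.2 - j
        if j ≠ k then acc2 ++ [(ip.1, max j k, min j k)] else acc2) acc) acc
    = l.foldl (fun acc ip => acc ++ (accHalf ip.1 ip.2 ++ (accHalf ip.1 ip.2).reverse)) acc := by
  induction l generalizing acc with
  | nil => rfl
  | cons x xs ih =>
    simp only [List.foldl_cons]
    rw [pile_eq]
    exact ih _

-- ===== VERDICT (by name: the statement is the Claim_ definition above) =====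
theorem acciones_spec : Claim_equal_acciones := by
  intro estado _
  unfold Spec_acciones acciones acciones_alt
  exact outer_eq _ _
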